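/-
  THE INSTANCE, AT THE BASE IMAGE'S TEXT RECORD, OF THE CLIENT LEMMAS OF ProgX/Spec/HeapLemmas.lean: the names the programs on the base
  image cite (`ProgX.Base.LiveIn.push_frame`, `hl.of_rest H' _`, `LiveIn.below_next h hinv`, `HeapPre.next_range hp` under
  `open ProgX.Base ProgX.Base.Spec`). Each is the generic lemma, restated for the abbreviations `ProgX.Base.LiveIn` and
  `ProgX.Base.Spec.HeapPre` as ProgX/Base/Spec/Basic.lean does for `LiveIn.sub` … (dot notation on a hypothesis stated with the
  abbreviation looks in this namespace first).

      LiveIn.push / push_frame       a live range stays live under one more active frame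
      LiveIn.of_nil                  a range inside ONE object of `others` is live under every list of frames
      LiveIn.rest_heap / of_rest     a range inside ONE object of `rest` is live in every heap and under every list of frames
      LiveIn.own                     a range inside an object of the own protected frame is live
      LiveIn.rest_offStack           a range inside an object of `rest` does not meet the stack region
      LiveIn.rest_where              … lies in the data space below the stack region
      LiveIn.below_next              a range live at the heap `H` meets no object allocated later
      LiveIn.apart_next              … and does not overlap the object `malloc` hands out next
      Spec.HeapPre.next_range        where the next object lies, from a function's `HeapPre`
      Spec.HeapPre.at_push_of / callee_frames_of / callee_window_of      `HeapPre` at a callee's entry (the present heap at the place of the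
                                     entry's: `hb`, `hl`)
-/
import ProgX.Base.Spec.Heap
import ProgX.Spec.HeapLemmas
namespace ProgX.Base
open X86 X86.User Asan

namespace LiveIn
variable {others rest : List Obj} {frames : List (Nat × FrameLayout)} {top a n : Nat} {mem : Mem}

/-- A live range of the precondition is live under one more active frame (the own frame of a protected function, pushed in front). -/
theorem push (h : LiveIn others frames a n) (bF : Nat × FrameLayout) : LiveIn others (bF :: frames) a n :=
  ProgX.LiveIn.push h bF

/-- A live range stays live under one more active frame (the callee's list of frames is the caller's with its own in front). -/
theorem push_frame (h : LiveIn others frames a n) (bF : Nat × FrameLayout) : LiveIn others (bF :: frames) a n :=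
  ProgX.LiveIn.push_frame h bF

/-- A range inside ONE object of `others` (no stack object) is live under every list of frames. -/
theorem of_nil (h : LiveIn others [] a n) : LiveIn others frames a n :=
  ProgX.LiveIn.of_nil h

/-- A range inside ONE object of `rest` is live in every heap and under every list of frames. -/
theorem rest_heap (h : LiveIn rest [] a n) (H : Heap) (frames : List (Nat × FrameLayout)) :
    LiveIn (H.liveObjs ++ rest) frames a n :=
  ProgX.LiveIn.rest_heap h H frames

/-- A range inside an object of `rest` is live under every heap and every list of frames. -/
theorem of_rest (h : LiveIn rest [] a n) (H : Heap) (frames : List (Nat × FrameLayout)) :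
    LiveIn (H.liveObjs ++ rest) frames a n :=
  ProgX.LiveIn.of_rest h H frames

/-- A range inside an object of the own protected frame is live in the frame list with the own frame in front: what a check goal
on a local asks (`(LiveIn.own _ ho h1 h2).accSmall hbody.inv hun …`). `ho` names the object by its NUMBERS. -/
theorem own (others : List Obj) {base : Nat} {Fl : FrameLayout} (ho : (⟨a, n, .stack⟩ : Obj) ∈ Fl.objsAt base) {b k : Nat}
    (h1 : a ≤ b) (h2 : b + k ≤ a + n) : LiveIn others ((base, Fl) :: frames) b k :=
  ProgX.LiveIn.own others ho h1 h2

/-- A range inside an object of `rest` does not meet the stack region `[700000H, 800000H)`. -/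
theorem rest_offStack {H : Heap} (h : LiveIn rest [] a n) (hinv : HeapInv H rest frames top mem) :
    a + n ≤ 0x700000 ∨ 0x800000 ≤ a :=
  ProgX.LiveIn.rest_offStack h hinv

/-- A non-empty range inside ONE object of `rest` lies in the data space below the stack region. -/
theorem rest_where {H : Heap} (hinv : HeapInv H rest frames top mem) (hb : H.base = 0x800000) (hl : H.limit = 0xC00000)
    (h : LiveIn rest [] a n) (hn : 0 < n) : 0x100000 ≤ a ∧ a + n ≤ 0x700000 :=
  ProgX.LiveIn.rest_where hinv hb hl h hn

/-- A live range of the heap `H` ends at or below the next object, or lies beyond the heap's region: it does not meet ANY object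
allocated later. -/
theorem below_next {H : Heap} {k : Nat} (h : LiveIn (H.liveObjs ++ rest) frames a k) (hinv : HeapInv H rest frames top mem) :
    a + k ≤ H.next ∨ H.limit ≤ a :=
  ProgX.LiveIn.below_next h hinv

/-- A live range of the heap `H` does not overlap the object `malloc` hands out next (`c` = its capacity). -/
theorem apart_next {H : Heap} {k c : Nat} (h : LiveIn (H.liveObjs ++ rest) frames a k) (hinv : HeapInv H rest frames top mem)
    (hfit : H.Fits c) : a + k ≤ H.next ∨ H.next + c ≤ a :=
  ProgX.LiveIn.apart_next h hinv hfit

end LiveIn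

namespace Spec.HeapPre
variable {H Hc : Heap} {rest : List Obj} {frames frames' : List (Nat × FrameLayout)}

/-- Where the next object lies, from a function's `HeapPre`: inside the heap's region `[800000H, C00000H)` with its left red zone. -/
theorem next_range {u : State} (hp : HeapPre H rest frames u) : 0x800040 ≤ H.next ∧ H.next ≤ 0xC00020 :=
  ProgX.Spec.HeapPre.next_range hp

/-- The heap's precondition at a callee's entry, inside a segment: ProgX/Spec/HeapLemmas.lean `HeapPre.at_push_of`. -/
theorem at_push_of {e s : State} {mem : Mem} {top : Nat} {a : Word} {x : Nat}
    (hp : HeapPre H rest frames e) (hb : Hc.base = H.base) (hl : Hc.limit = H.limit) (hinv : HeapInv Hc rest frames top mem)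
    (hrsp : s.reg .rsp = a) (hmem : s.mem = mem.writeLE a 8 x) (ha : a.toNat + 8 = top) : HeapPre Hc rest frames s :=
  ProgX.Spec.HeapPre.at_push_of hp hb hl hinv hrsp hmem ha

/-- `HeapPre` at the entry of a callee, general form: ProgX/Spec/HeapLemmas.lean `HeapPre.callee_frames_of`. -/
theorem callee_frames_of {e s : State} {top : Nat} {mem : Mem} {ws : List Span}
    (hpre : HeapPre H rest frames e) (hb : Hc.base = H.base) (hl : Hc.limit = H.limit)
    (hinv : HeapInv Hc rest frames' top mem) (hs : Mem.SameExcept ws mem s.mem) (hw : ∀ w, w ∈ ws → w.hi ≤ 0x800000)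
    (hsp : (s.reg .rsp).toNat + 8 ≤ top) (h8 : (s.reg .rsp).toNat % 8 = 0) (hlo' : 0x700000 ≤ (s.reg .rsp).toNat + 8) :
    HeapPre Hc rest frames' s :=
  ProgX.Spec.HeapPre.callee_frames_of hpre hb hl hinv hs hw hsp h8 hlo'

/-- `HeapPre` at the entry of a callee, one window: ProgX/Spec/HeapLemmas.lean `HeapPre.callee_window_of`. -/
theorem callee_window_of {e s : State} {top lo hi : Nat} {mem : Mem}
    (hpre : HeapPre H rest frames e) (hb : Hc.base = H.base) (hl : Hc.limit = H.limit)
    (hinv : HeapInv Hc rest frames' top mem) (hs : Mem.SameExcept [⟨lo, hi⟩] mem s.mem) (hhi : hi ≤ 0x800000)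
    (hsp : (s.reg .rsp).toNat + 8 ≤ top) (h8 : (s.reg .rsp).toNat % 8 = 0) (hlo' : 0x700000 ≤ (s.reg .rsp).toNat + 8) :
    HeapPre Hc rest frames' s :=
  ProgX.Spec.HeapPre.callee_window_of hpre hb hl hinv hs hhi hsp h8 hlo'

end Spec.HeapPre

end ProgX.Base
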